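-- pv_equiv track=rewrite | github.com/samarth1612/VLIW-Architecture | Helpers.py | checkWAW
-- ===== SOURCE A (Python) =====
-- def checkWAW(packet, inst):
--     """
--     Checks the WAW data dependencies in the given packet of instructions
--
--     Input:
--     - packet: Instruction packet for dependency check
--     - inst: Next upcoming instruction
--
--     Output:
--     - True if there is a WAW data dependency
--     - False if there is no WAW data dependency
--     """
--     out_1, out_2 = getOutput(inst)
--     for y in packet.values():
--         if not y:
--             continue
--         if y[0] == "00100":
--             if inst[0] == '00100':
--                 if y[1] in [out_1, out_2] or y[2] in [out_1, out_2]: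
--                     return True
--             else:
--                 if y[1] == out_1 or y[2] == out_1:
--                     return True
--         else:
--             if inst[0] == '00100':
--                 if y[1] in [out_1, out_2]:
--                     return True
--             else:
--                 if y[1] == out_1:
--                     return True
--     return False
--
-- def getOutput(inst):
--     """
--     Get the outputs of the instruction
--
--     Input:
--     - inst: The instruction list
--
--     Output:
--     - Returns the outputs of the instruction
--     """
--     return inst[1], inst[2]
-- ===== SOURCE B (Python) =====
-- def checkWAW(packet, inst):
--     # Stage 1: union of every register written by the packet (no comparisons here).
--     written = set()
--     for y in packet.values():
--         if not y:
--             continue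
--         written.add(y[1])
--         if y[0] == '00100':
--             written.add(y[2])
--     # Stage 2: single membership test of inst's write registers.
--     if inst[1] in written:
--         return True
--     return inst[0] == '00100' and inst[2] in written
-- ===== Notes on version B (the rewrite author's own statement) =====
-- stated objective: simpler
-- what changed: Two staged passes instead of A's compare-per-instruction early-return loop: first aggregate the union of all registers the packet writes (a loop with no comparisons and no early exit), then one membership test of inst's write registers against that union; A's 2x2 nested branch tree disappears.
-- outside the precondition, e.g. on checkWAW({'a': ['0', '1', 'x'], 'b': ['z']}, ['0', '1', '2']): A returns True, B raises IndexError
import Mathlib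
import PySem

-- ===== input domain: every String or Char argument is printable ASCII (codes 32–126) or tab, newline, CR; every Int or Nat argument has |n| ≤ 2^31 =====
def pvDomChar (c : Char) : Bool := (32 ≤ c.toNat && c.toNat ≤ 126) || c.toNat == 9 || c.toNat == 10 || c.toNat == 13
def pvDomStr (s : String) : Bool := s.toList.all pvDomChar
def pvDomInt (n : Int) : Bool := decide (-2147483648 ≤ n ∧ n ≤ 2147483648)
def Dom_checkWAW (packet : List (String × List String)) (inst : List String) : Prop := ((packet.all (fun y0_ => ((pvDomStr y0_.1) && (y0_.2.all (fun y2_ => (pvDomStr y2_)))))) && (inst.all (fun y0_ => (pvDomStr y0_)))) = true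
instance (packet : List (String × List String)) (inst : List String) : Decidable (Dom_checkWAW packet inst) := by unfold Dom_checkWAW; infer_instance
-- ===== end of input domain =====

-- B restages the computation: one pass aggregates the union of all registers the packet writes,
-- then a single membership test of inst's write registers decides the result (simpler, same O(n)).

-- xs[i]; on Pre_-admitted inputs every index used is in range, so the "" default is never the result
def pvGet (xs : List String) (i : Int) : String := (PySem.List.pyGet? xs i).getD ""

-- ===== PORT A =====
def pvGetOutput (inst : List String) : String × String := (pvGet inst 1, pvGet inst 2)

def checkWAWLoop (inst : List String) (out1 out2 : String) : List (List String) → Bool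
  | [] => false
  | y :: rest =>
    if y.isEmpty then checkWAWLoop inst out1 out2 rest
    else if pvGet y 0 = "00100" then
      if pvGet inst 0 = "00100" then
        if (pvGet y 1 = out1 ∨ pvGet y 1 = out2) ∨ (pvGet y 2 = out1 ∨ pvGet y 2 = out2) then true
        else checkWAWLoop inst out1 out2 rest
      else
        if pvGet y 1 = out1 ∨ pvGet y 2 = out1 then true
        else checkWAWLoop inst out1 out2 rest
    else
      if pvGet inst 0 = "00100" then
        if pvGet y 1 = out1 ∨ pvGet y 1 = out2 then true
        else checkWAWLoop inst out1 out2 rest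
      else
        if pvGet y 1 = out1 then true
        else checkWAWLoop inst out1 out2 rest

def checkWAW (packet : List (String × List String)) (inst : List String) : Bool :=
  let o := pvGetOutput inst
  checkWAWLoop inst o.1 o.2 (packet.map Prod.snd)

-- ===== PORT B =====
-- stage 1 of Source B: the loop accumulating the set of registers written by the packet
def collectWrites : List (List String) → PySem.Set String → PySem.Set String
  | [], w => w
  | y :: rest, w =>
    if y.isEmpty then collectWrites rest w
    else
      collectWrites rest
        (if pvGet y 0 = "00100"
          then PySem.Set.add (PySem.Set.add w (pvGet y 1)) (pvGet y 2)
          else PySem.Set.add w (pvGet y 1))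

def checkWAW_alt (packet : List (String × List String)) (inst : List String) : Bool :=
  let written := collectWrites (packet.map Prod.snd) PySem.Set.empty
  if PySem.Set.contains written (pvGet inst 1) then true
  else decide (pvGet inst 0 = "00100") && PySem.Set.contains written (pvGet inst 2)

-- ===== PRECONDITION & SPEC =====
-- Pre_ excludes inputs on which Python A raises IndexError (inst shorter than 3, or a packet
-- containing a nonempty instruction of length < 2, or of length < 3 with opcode "00100");
-- an early match can let A return True before reaching such a malformed entry, so a few inputs
-- A returns on are excluded too (see cites).
def Pre_checkWAW (packet : List (String × List String)) (inst : List String) : Prop :=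
  3 ≤ inst.length ∧ ∀ p ∈ packet, p.2 ≠ [] →
    (2 ≤ p.2.length ∧ (pvGet p.2 0 = "00100" → 3 ≤ p.2.length))
instance (packet : List (String × List String)) (inst : List String) : Decidable (Pre_checkWAW packet inst) := by unfold Pre_checkWAW; infer_instance

def pvWitness_checkWAW : (List (String × List String)) × List String :=
  ([("a", ["00100", "1", "2"]), ("b", [])], ["00000", "1", "2"])

def Spec_checkWAW (packet : List (String × List String)) (inst : List String) (out : Bool) : Prop := out = checkWAW_alt packet inst
instance (packet : List (String × List String)) (inst : List String) (out : Bool) : Decidable (Spec_checkWAW packet inst out) := by unfold Spec_checkWAW; infer_instance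

-- ===== CLAIM (what is proved, stated in full; the proofs are below) =====
def Claim_equal_checkWAW : Prop := ∀ (packet : List (String × List String)) (inst : List String), Dom_checkWAW packet inst → Pre_checkWAW packet inst → Spec_checkWAW packet inst (checkWAW packet inst)

-- ===== LEMMAS AND PROOFS =====

-- membership in the accumulated write set
lemma mem_collectWrites (ys : List (List String)) (w : PySem.Set String) (x : String) :
    x ∈ collectWrites ys w ↔
      x ∈ w ∨ ∃ y ∈ ys, ¬ y.isEmpty ∧
        (x = pvGet y 1 ∨ (pvGet y 0 = "00100" ∧ x = pvGet y 2)) := by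
  induction ys generalizing w with
  | nil => simp [collectWrites]
  | cons y rest ih =>
    by_cases hy : y.isEmpty
    · simp [collectWrites, ih, List.isEmpty_iff.mp hy]
    · simp only [collectWrites, hy]
      split_ifs with h <;> simp [ih, PySem.Set.mem_add] <;> aesop

-- A's early-return loop returns true iff some packet instruction writes out1 (or out2 when inst is "00100")
lemma checkWAWLoop_eq_true (inst : List String) (ys : List (List String)) :
    checkWAWLoop inst (pvGet inst 1) (pvGet inst 2) ys = true ↔
      ∃ y ∈ ys, ¬ y.isEmpty ∧
        ((pvGet inst 1 = pvGet y 1 ∨ (pvGet y 0 = "00100" ∧ pvGet inst 1 = pvGet y 2)) ∨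
         (pvGet inst 0 = "00100" ∧
           (pvGet inst 2 = pvGet y 1 ∨ (pvGet y 0 = "00100" ∧ pvGet inst 2 = pvGet y 2)))) := by
  induction ys with
  | nil => simp [checkWAWLoop]
  | cons y rest ih =>
    by_cases hy : y.isEmpty
    · simp [checkWAWLoop, ih, List.isEmpty_iff.mp hy]
    · simp only [checkWAWLoop, hy]
      split_ifs <;> simp_all <;> aesop

-- ===== VERDICT (by name: the statement is the Claim_ definition above) =====
theorem checkWAW_spec : Claim_equal_checkWAW := by
  intro packet inst _ _
  show checkWAW packet inst = checkWAW_alt packet inst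
  rw [Bool.eq_iff_iff]
  simp only [checkWAW, checkWAW_alt, pvGetOutput]
  rw [checkWAWLoop_eq_true]
  have hm := mem_collectWrites (packet.map Prod.snd) PySem.Set.empty
  simp only [PySem.Set.empty, List.not_mem_nil, false_or] at hm
  constructor
  · rintro ⟨y, hyin, hne, hc⟩
    simp only [PySem.Set.contains_iff]
    by_cases h1 : pvGet inst 1 ∈ collectWrites (List.map Prod.snd packet) []
    · simp [h1]
    · have : ¬ (pvGet inst 1 = pvGet y 1 ∨ pvGet y 0 = "00100" ∧ pvGet inst 1 = pvGet y 2) := by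
        intro hc1; exact h1 ((hm _).mpr ⟨y, hyin, hne, hc1⟩)
      rcases hc with hc | ⟨hop, hc⟩
      · exact absurd hc this
      · simp [h1, hop, (hm _).mpr ⟨y, hyin, hne, hc⟩]
  · intro hb
    simp only [PySem.Set.contains_iff] at hb
    split_ifs at hb with h1
    · rcases (hm _).mp h1 with ⟨y, hyin, hne, hx⟩
      exact ⟨y, hyin, hne, Or.inl hx⟩
    · simp only [Bool.and_eq_true, decide_eq_true_eq, PySem.Set.contains_iff] at hb
      rcases (hm _).mp hb.2 with ⟨y, hyin, hne, hx⟩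
      exact ⟨y, hyin, hne, Or.inr ⟨hb.1, hx⟩⟩
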